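-- pv_equiv track=rewrite | github.com/Anisoze/-ourse2 | Course2.py | dist_from_LL_code
-- ===== SOURCE A (Python) =====
-- def dist_from_LL_code(val, extra):             #get distance from symbols and extra bits from LL table from RFC 1951            #reverse
--
--     if(val<4):           #no extra bits
--         return val+1
--
--
--     else:               #with extra bits
--         k=(val-4)//2
--         pos=(val-4)%2
--         Dist=5
--         for i in range(k):
--             Dist+=(2**(2+i))
--         for i in range(pos):
--             Dist+=2**(1+k)
--
--         return Dist+extra
-- ===== SOURCE B (Python) =====
-- def dist_from_LL_code(val, extra):
--     # Closed-form geometric sum instead of the O(val) loops; same values everywhere.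
--     if val < 4:
--         return val + 1
--     k, pos = divmod(val - 4, 2)
--     return 1 + (1 << (k + 2)) + pos * (1 << (k + 1)) + extra
-- ===== Notes on version B (the rewrite author's own statement) =====
-- stated objective: faster
-- what changed: Replaced the two accumulation loops by the closed-form geometric sum 1 + 2^(k+2) + pos*2^(k+1) + extra computed with shifts.
import Mathlib
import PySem

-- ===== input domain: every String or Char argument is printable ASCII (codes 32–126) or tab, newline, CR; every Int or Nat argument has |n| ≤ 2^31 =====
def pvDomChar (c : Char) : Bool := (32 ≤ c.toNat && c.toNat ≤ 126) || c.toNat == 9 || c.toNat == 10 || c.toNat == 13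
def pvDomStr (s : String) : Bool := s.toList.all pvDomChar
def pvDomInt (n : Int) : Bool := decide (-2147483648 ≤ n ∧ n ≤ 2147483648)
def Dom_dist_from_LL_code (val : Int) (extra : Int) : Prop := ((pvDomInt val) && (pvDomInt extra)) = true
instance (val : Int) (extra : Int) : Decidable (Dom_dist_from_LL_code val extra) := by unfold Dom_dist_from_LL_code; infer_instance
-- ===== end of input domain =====

-- B replaces A's two accumulation loops by the closed form 1 + 2^(k+2) + pos*2^(k+1) + extra (O(1) vs O(val)).

-- ===== PORT A =====
def dist_from_LL_code (val : Int) (extra : Int) : Int :=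
  if val < 4 then val + 1
  else
    let k := PySem.Int.floordiv (val - 4) 2
    let pos := PySem.Int.mod (val - 4) 2
    let dist : Int := 5
    let dist := (PySem.List.pyRange 0 k 1).foldl (fun d i => d + 2 ^ (2 + i).toNat) dist
    let dist := (PySem.List.pyRange 0 pos 1).foldl (fun d _ => d + 2 ^ (1 + k).toNat) dist
    dist + extra

-- ===== PORT B =====
def dist_from_LL_code_alt (val : Int) (extra : Int) : Int :=
  if val < 4 then val + 1
  else
    let k := PySem.Int.floordiv (val - 4) 2
    let pos := PySem.Int.mod (val - 4) 2
    1 + 2 ^ (k + 2).toNat + pos * 2 ^ (k + 1).toNat + extra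

-- ===== PRECONDITION & SPEC =====
def Spec_dist_from_LL_code (val : Int) (extra : Int) (out : Int) : Prop := out = dist_from_LL_code_alt val extra
instance (val : Int) (extra : Int) (out : Int) : Decidable (Spec_dist_from_LL_code val extra out) := by unfold Spec_dist_from_LL_code; infer_instance

-- ===== CLAIM (what is proved, stated in full; the proofs are below) =====
def Claim_equal_dist_from_LL_code : Prop := ∀ (val : Int) (extra : Int), Dom_dist_from_LL_code val extra → Spec_dist_from_LL_code val extra (dist_from_LL_code val extra)

-- ===== LEMMAS AND PROOFS =====

-- A's first loop sums the geometric series 2^2 + … + 2^(n+1) = 4*(2^n - 1).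
theorem pv_loop1 (n : ℕ) (c : Int) :
    (PySem.List.pyRange 0 (n : Int) 1).foldl (fun d i => d + 2 ^ (2 + i).toNat) c
      = c + 4 * (2 ^ n - 1) := by
  induction n generalizing c with
  | zero => simp
  | succ m ih =>
      have h : PySem.List.pyRange 0 ((m : Int) + 1) 1
          = PySem.List.pyRange 0 (m : Int) 1 ++ [(m : Int)] :=
        PySem.List.pyRange_one_succ_right (by exact_mod_cast Nat.zero_le m)
      push_cast
      rw [h, List.foldl_append, ih]
      have h2 : ((2 : Int) + (m : Int)).toNat = m + 2 := by omega
      simp only [List.foldl_cons, List.foldl_nil, h2]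
      have : (2 : Int) ^ (m + 2) = 4 * 2 ^ m := by ring
      rw [this]
      have : (2 : Int) ^ (m + 1) = 2 * 2 ^ m := by ring
      rw [this]
      ring

-- ===== VERDICT =====
theorem dist_from_LL_code_spec : Claim_equal_dist_from_LL_code := by
  intro val extra _
  unfold Spec_dist_from_LL_code dist_from_LL_code dist_from_LL_code_alt
  by_cases h : val < 4
  · simp [h]
  · simp only [h, if_false]
    have hk0 : 0 ≤ PySem.Int.floordiv (val - 4) 2 := by
      simp only [PySem.Int.floordiv]
      exact Int.fdiv_nonneg (by omega) (by norm_num)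
    obtain ⟨n, hn⟩ : ∃ n : ℕ, PySem.Int.floordiv (val - 4) 2 = (n : Int) :=
      ⟨_, (Int.toNat_of_nonneg hk0).symm⟩
    have hfm : PySem.Int.mod (val - 4) 2 = (val - 4) % 2 := by
      simp only [PySem.Int.mod]
      rw [Int.fmod_eq_emod]
      simp
    rw [hn, hfm, pv_loop1]
    have e2 : ((n : Int) + 2).toNat = n + 2 := by omega
    have e1 : ((n : Int) + 1).toNat = n + 1 := by omega
    have e1' : ((1 : Int) + (n : Int)).toNat = n + 1 := by omega
    rcases Int.emod_two_eq (val - 4) with hp | hp <;> rw [hp]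
    · have hr : PySem.List.pyRange 0 0 1 = [] := by decide
      rw [hr]
      simp only [List.foldl_nil, e2]
      have a1 : (2 : Int) ^ (n + 2) = 4 * 2 ^ n := by ring
      rw [a1]; ring
    · have hr : PySem.List.pyRange 0 1 1 = [0] := by decide
      rw [hr]
      simp only [List.foldl_cons, List.foldl_nil, e1, e1', e2]
      have a1 : (2 : Int) ^ (n + 2) = 4 * 2 ^ n := by ring
      have a2 : (2 : Int) ^ (n + 1) = 2 * 2 ^ n := by ring
      rw [a1, a2]; ring
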